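-- pv_equiv track=rewrite | github.com/Tr4l3x/BachelorThesis | UtilFunctions.py | ascending_patition
-- ===== SOURCE A (Python) =====
-- def ascending_patition(onsets):
--     # Edgecase if there is only one onset
--     if len(onsets) == 1:
--         res = []
--         res.append(onsets)
--         return res
--     result = []
--     seq = []
--     for i in range(len(onsets)):
--         if (len(seq) == 0 or (onsets[i] == onsets[i-1]+1)) and i != len(onsets)-1:
--             seq.append(onsets[i])
--             continue
--         elif i == len(onsets) - 1:
--             if onsets[i] == (onsets[i-1]+1):
--                 seq.append(onsets[i])
--             else:
--                 result.append(seq)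
--                 seq = [onsets[i]]
--         result.append(seq)
--         seq = [onsets[i]]
--     return result
-- ===== SOURCE B (Python) =====
-- from itertools import groupby
--
-- def ascending_patition(onsets):
--     # a maximal ascending-consecutive run is exactly a block where value - index is constant
--     return [[v for _, v in grp]
--             for _, grp in groupby(enumerate(onsets), key=lambda p: p[1] - p[0])]
-- ===== Notes on version B (the rewrite author's own statement) =====
-- stated objective: idiomatic
-- what changed: Replaces the explicit index loop with its current-run buffer and last-iteration special cases by a one-expression itertools.groupby over enumerate, keyed on the constant value-minus-index invariant of a consecutive run.
import Mathlib
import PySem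

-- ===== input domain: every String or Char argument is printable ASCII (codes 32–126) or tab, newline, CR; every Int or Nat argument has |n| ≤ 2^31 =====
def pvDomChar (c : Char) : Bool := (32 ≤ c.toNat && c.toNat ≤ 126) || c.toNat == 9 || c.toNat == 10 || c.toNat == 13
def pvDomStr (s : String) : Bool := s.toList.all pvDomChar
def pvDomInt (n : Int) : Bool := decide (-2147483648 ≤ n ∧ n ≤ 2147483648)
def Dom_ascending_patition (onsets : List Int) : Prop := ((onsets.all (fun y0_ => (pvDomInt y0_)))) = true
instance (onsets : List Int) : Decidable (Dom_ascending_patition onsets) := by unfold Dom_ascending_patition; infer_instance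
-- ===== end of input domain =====

-- B replaces A's index loop with current-run buffer and last-iteration special cases by an
-- itertools.groupby over enumerate keyed on the value-minus-index run invariant (objective: idiomatic).

-- ===== PORT A =====
-- Loop body of A's 'for i in range(len(onsets))', state (result, seq).
-- All indices i and i-1 are in range (len ≥ 2 in the loop; i-1 = -1 only when seq = [],
-- where Python's 'or' short-circuits before inspecting onsets[i-1], and pyGetD -1 is the
-- last element anyway), so pyGetD with default 0 is exact here.
def ascendingStepA (onsets : List Int) (n : Int) (st : List (List Int) × List Int) (i : Int) :
    List (List Int) × List Int :=
  let result := st.1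
  let seq := st.2
  let oi := PySem.List.pyGetD onsets i 0
  let oim1 := PySem.List.pyGetD onsets (i - 1) 0
  if (seq.length = 0 ∨ oi = oim1 + 1) ∧ i ≠ n - 1 then
    (result, seq ++ [oi])
  else if i = n - 1 then
    if oi = oim1 + 1 then
      (result ++ [seq ++ [oi]], [oi])
    else
      ((result ++ [seq]) ++ [[oi]], [oi])
  else
    (result ++ [seq], [oi])

def ascending_patition (onsets : List Int) : List (List Int) :=
  if onsets.length = 1 then [onsets]
  else
    ((PySem.List.pyRange 0 (onsets.length : Int) 1).foldl
      (ascendingStepA onsets (onsets.length : Int)) ([], [])).1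

-- ===== PORT B =====
-- enumerate(onsets) starting at index j (Python's builtin enumerate, ported by hand; exact).
def pvEnum (j : Int) : List Int → List (Int × Int)
  | [] => []
  | x :: xs => (j, x) :: pvEnum (j + 1) xs

-- itertools.groupby collecting each group's elements (ported by hand; exact for a total key).
def pvGroupGo (key : Int × Int → Int) (cur : List (Int × Int)) (k : Int) :
    List (Int × Int) → List (List (Int × Int))
  | [] => [cur]
  | p :: ps => if key p = k then pvGroupGo key (cur ++ [p]) k ps
               else cur :: pvGroupGo key [p] (key p) ps

def pvGroupby (key : Int × Int → Int) : List (Int × Int) → List (List (Int × Int))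
  | [] => []
  | p :: ps => pvGroupGo key [p] (key p) ps

def ascending_patition_alt (onsets : List Int) : List (List Int) :=
  (pvGroupby (fun p => p.2 - p.1) (pvEnum 0 onsets)).map (fun g => g.map (fun p => p.2))

-- ===== PRECONDITION & SPEC =====
def Spec_ascending_patition (onsets : List Int) (out : List (List Int)) : Prop := out = ascending_patition_alt onsets
instance (onsets : List Int) (out : List (List Int)) : Decidable (Spec_ascending_patition onsets out) := by unfold Spec_ascending_patition; infer_instance

-- ===== CLAIM (what is proved, stated in full; the proofs are below) =====
def Claim_equal_ascending_patition : Prop := ∀ (onsets : List Int), Dom_ascending_patition onsets → Spec_ascending_patition onsets (ascending_patition onsets)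

-- ===== LEMMAS AND PROOFS =====

-- Reference: maximal ascending-consecutive runs, structurally.
def pvChunk : List Int → List (List Int)
  | [] => []
  | [x] => [[x]]
  | x :: y :: rest =>
    match pvChunk (y :: rest) with
    | [] => [[x]]          -- unreachable
    | g :: gs => if y = x + 1 then (x :: g) :: gs else [x] :: g :: gs

-- prepend s to the first group
def pvConsHead (s : List Int) : List (List Int) → List (List Int)
  | [] => [s]
  | g :: gs => (s ++ g) :: gs

lemma pvChunk_ne_nil (x : Int) (xs : List Int) : pvChunk (x :: xs) ≠ [] := by
  cases xs with
  | nil => simp [pvChunk]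
  | cons y rest =>
    simp only [pvChunk]
    split
    · simp
    · split <;> simp

-- Structural model of A's loop from a point where seq is the nonempty current run and
-- prev is the previous onset value.
def pvLoopA (prev : Int) (res : List (List Int)) (seq : List Int) : List Int → List (List Int)
  | [] => res
  | [x] => if x = prev + 1 then res ++ [seq ++ [x]] else (res ++ [seq]) ++ [[x]]
  | x :: y :: rest =>
    if seq.length = 0 ∨ x = prev + 1 then pvLoopA x res (seq ++ [x]) (y :: rest)
    else pvLoopA x (res ++ [seq]) [x] (y :: rest)

lemma pvLoopA_chunk (suf : List Int) : ∀ (prev : Int) (res : List (List Int)) (seq : List Int),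
    seq ≠ [] → suf ≠ [] →
    pvLoopA prev res seq suf =
      if suf.head! = prev + 1 then res ++ pvConsHead seq (pvChunk suf)
      else res ++ [seq] ++ pvChunk suf := by
  induction suf with
  | nil => intro prev res seq _ h; exact absurd rfl h
  | cons x t ih =>
    intro prev res seq hseq _
    cases t with
    | nil =>
      by_cases h : x = prev + 1 <;> simp [pvLoopA, pvChunk, pvConsHead, h]
    | cons y rest =>
      have hs0 : ¬ seq.length = 0 := by simpa using hseq
      rcases hc : pvChunk (y :: rest) with _ | ⟨g, gs⟩
      · exact absurd hc (pvChunk_ne_nil y rest)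
      · by_cases hx : x = prev + 1
        · subst hx
          rw [show pvLoopA prev res seq ((prev + 1) :: y :: rest)
                = pvLoopA (prev + 1) res (seq ++ [prev + 1]) (y :: rest)
              from by simp [pvLoopA]]
          rw [ih _ _ _ (by simp) (by simp)]
          simp only [List.head!_cons, pvChunk, hc]
          by_cases hy : y = prev + 1 + 1 <;> simp [hy, pvConsHead]
        · rw [show pvLoopA prev res seq (x :: y :: rest) = pvLoopA x (res ++ [seq]) [x] (y :: rest)
              from by simp [pvLoopA, hs0, hx]]
          rw [ih x (res ++ [seq]) [x] (by simp) (by simp)]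
          simp only [List.head!_cons, pvChunk, hc]
          by_cases hy : y = x + 1 <;> simp [hy, pvConsHead, hx]

lemma pvGetD_mid (pre suf : List Int) (v : Int) :
    PySem.List.pyGetD (pre ++ v :: suf) ((pre.length : Int)) 0 = v := by
  rw [PySem.List.pyGetD_natCast]
  induction pre with
  | nil => simp
  | cons p ps ih => simpa using ih

lemma pvGetD_mid' (pre suf : List Int) (prev v : Int) :
    PySem.List.pyGetD (pre ++ prev :: v :: suf) ((pre.length : Int) + 1) 0 = v := by
  have h1 : pre ++ prev :: v :: suf = (pre ++ [prev]) ++ v :: suf := by simp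
  have h2 : ((pre.length : Int) + 1) = (((pre ++ [prev]).length : Nat) : Int) := by
    simp
  rw [h1, h2]
  exact pvGetD_mid _ _ _

lemma pvBridge (suf : List Int) : ∀ (pre : List Int) (prev : Int)
    (res : List (List Int)) (seq : List Int), suf ≠ [] →
    ((PySem.List.pyRange ((pre.length : Int) + 1) (((pre ++ prev :: suf).length : Int)) 1).foldl
      (ascendingStepA (pre ++ prev :: suf) ((pre ++ prev :: suf).length : Int)) (res, seq)).1
    = pvLoopA prev res seq suf := by
  induction suf with
  | nil => intro _ _ _ _ h; exact absurd rfl h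
  | cons x t ih =>
    intro pre prev res seq _
    have g1 : PySem.List.pyGetD (pre ++ prev :: x :: t) ((pre.length : Int) + 1) 0 = x :=
      pvGetD_mid' pre t prev x
    have g0 : PySem.List.pyGetD (pre ++ prev :: x :: t) ((pre.length : Int) + 1 - 1) 0 = prev := by
      rw [show ((pre.length : Int) + 1 - 1) = ((pre.length : Nat) : Int) from by ring]
      exact pvGetD_mid _ _ _
    have hlen : (((pre ++ prev :: x :: t).length : Nat) : Int)
        = (pre.length : Int) + 2 + (t.length : Int) := by
      simp; push_cast; ring
    cases t with
    | nil =>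
      have hr : PySem.List.pyRange ((pre.length : Int) + 1)
          (((pre ++ prev :: [x]).length : Nat) : Int) 1 = [(pre.length : Int) + 1] := by
        rw [hlen]
        rw [show (pre.length : Int) + 2 + (([] : List Int).length : Int)
              = ((pre.length : Int) + 1) + 1 from by simp; omega]
        exact PySem.List.pyRange_one_singleton _
      rw [hr]
      simp only [List.foldl_cons, List.foldl_nil]
      simp only [ascendingStepA]
      rw [g1, g0]
      have harith : (pre.length : Int) + 1
          = (((pre ++ prev :: [x]).length : Nat) : Int) - 1 := by
        simp
        omega
      rw [if_neg (fun h => h.2 harith), if_pos harith]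
      by_cases hx : x = prev + 1
      · rw [if_pos hx]
        simp [pvLoopA, hx]
      · rw [if_neg hx]
        simp [pvLoopA, hx]
    | cons y rest =>
      have hlt : (pre.length : Int) + 1 < (((pre ++ prev :: x :: y :: rest).length : Nat) : Int) := by
        simp
        omega
      rw [PySem.List.pyRange_one_cons hlt]
      simp only [List.foldl_cons]
      have harith : ¬ ((pre.length : Int) + 1
          = (((pre ++ prev :: x :: y :: rest).length : Nat) : Int) - 1) := by
        simp only [List.length_append, List.length_cons]
        push_cast
        omega
      have hih := ih (pre ++ [prev]) x
      have hihl : ((pre ++ [prev]).length : Int) + 1 = (pre.length : Int) + 1 + 1 := by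
        simp
      have hihL : (pre ++ [prev]) ++ x :: y :: rest = pre ++ prev :: x :: y :: rest := by simp
      by_cases hx : seq.length = 0 ∨ x = prev + 1
      · have hstep : ascendingStepA (pre ++ prev :: x :: y :: rest)
            (((pre ++ prev :: x :: y :: rest).length : Nat) : Int) (res, seq)
            ((pre.length : Int) + 1) = (res, seq ++ [x]) := by
          simp only [ascendingStepA]
          rw [g1, g0, if_pos ⟨hx, harith⟩]
        rw [hstep]
        have heq := hih res (seq ++ [x]) (by simp)
        rw [hihl, hihL] at heq
        rw [heq]
        have hl : pvLoopA prev res seq (x :: y :: rest) = pvLoopA x res (seq ++ [x]) (y :: rest) := by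
          simp only [pvLoopA]
          rw [if_pos hx]
        rw [hl]
      · have hstep : ascendingStepA (pre ++ prev :: x :: y :: rest)
            (((pre ++ prev :: x :: y :: rest).length : Nat) : Int) (res, seq)
            ((pre.length : Int) + 1) = (res ++ [seq], [x]) := by
          simp only [ascendingStepA]
          rw [g1, g0, if_neg (fun h => hx h.1), if_neg (fun h => harith h)]
        rw [hstep]
        have heq := hih (res ++ [seq]) [x] (by simp)
        rw [hihl, hihL] at heq
        rw [heq]
        have hl : pvLoopA prev res seq (x :: y :: rest) = pvLoopA x (res ++ [seq]) [x] (y :: rest) := by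
          simp only [pvLoopA]
          rw [if_neg hx]
        rw [hl]

lemma pvGroupGo_chunk (xs : List Int) : ∀ (j k : Int) (cur : List (Int × Int)),
    (pvGroupGo (fun p => p.2 - p.1) cur k (pvEnum j xs)).map (fun g => g.map (fun p => p.2)) =
      match xs with
      | [] => [cur.map (fun p => p.2)]
      | x :: _ => if x = k + j then pvConsHead (cur.map (fun p => p.2)) (pvChunk xs)
                  else (cur.map (fun p => p.2)) :: pvChunk xs := by
  induction xs with
  | nil => intro j k cur; simp [pvEnum, pvGroupGo]
  | cons x t ih =>
    intro j k cur
    cases t with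
    | nil =>
      by_cases h : x - j = k
      · have hx : x = k + j := by omega
        simp [pvEnum, pvGroupGo, h, hx, pvChunk, pvConsHead]
      · have hx : ¬ x = k + j := by omega
        simp [pvEnum, pvGroupGo, h, hx, pvChunk, pvConsHead]
    | cons y r =>
      rcases hc : pvChunk (y :: r) with _ | ⟨g, gs⟩
      · exact absurd hc (pvChunk_ne_nil y r)
      · by_cases h : x - j = k
        · have hx : x = k + j := by omega
          rw [show pvGroupGo (fun p => p.2 - p.1) cur k (pvEnum j (x :: y :: r))
                = pvGroupGo (fun p => p.2 - p.1) (cur ++ [(j, x)]) k (pvEnum (j + 1) (y :: r))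
              from by simp [pvEnum, pvGroupGo, h]]
          rw [ih (j + 1) k (cur ++ [(j, x)])]
          by_cases hy : y = x + 1
          · have c1 : (y = k + (j + 1)) = True := eq_true (by omega)
            have c2 : (y = x + 1) = True := eq_true hy
            have c3 : (y = k + j + 1) = True := eq_true (by omega)
            simp [pvChunk, hc, pvConsHead, c1, c2, c3, hx]
          · have c1 : (y = k + (j + 1)) = False := eq_false (by omega)
            have c2 : (y = x + 1) = False := eq_false hy
            have c3 : (y = k + j + 1) = False := eq_false (by omega)
            simp [pvChunk, hc, pvConsHead, c1, c2, c3, hx]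
        · have hx : ¬ x = k + j := by omega
          rw [show pvGroupGo (fun p => p.2 - p.1) cur k (pvEnum j (x :: y :: r))
                = cur :: pvGroupGo (fun p => p.2 - p.1) [(j, x)] (x - j) (pvEnum (j + 1) (y :: r))
              from by simp [pvEnum, pvGroupGo, h]]
          simp only [List.map_cons]
          rw [ih (j + 1) (x - j) [(j, x)]]
          by_cases hy : y = x + 1
          · have c1 : (y = x - j + (j + 1)) = True := eq_true (by omega)
            have c2 : (y = x + 1) = True := eq_true hy
            simp [pvChunk, hc, pvConsHead, c1, c2, hx]
          · have c1 : (y = x - j + (j + 1)) = False := eq_false (by omega)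
            have c2 : (y = x + 1) = False := eq_false hy
            simp [pvChunk, hc, pvConsHead, c1, c2, hx]

lemma pvAlt_eq_chunk (onsets : List Int) : ascending_patition_alt onsets = pvChunk onsets := by
  cases onsets with
  | nil => simp [ascending_patition_alt, pvEnum, pvGroupby, pvChunk]
  | cons x xs =>
    simp only [ascending_patition_alt, pvEnum, pvGroupby]
    rw [pvGroupGo_chunk xs]
    cases xs with
    | nil => simp [pvChunk]
    | cons y r =>
      rcases hc : pvChunk (y :: r) with _ | ⟨g, gs⟩
      · exact absurd hc (pvChunk_ne_nil y r)
      · by_cases hy : y = x + 1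
        · have c1 : (y = x - 0 + (0 + 1)) = True := eq_true (by omega)
          have c2 : (y = x + 1) = True := eq_true hy
          simp [pvChunk, hc, pvConsHead, c1, c2]
        · have c1 : (y = x - 0 + (0 + 1)) = False := eq_false (by omega)
          have c2 : (y = x + 1) = False := eq_false hy
          simp [pvChunk, hc, pvConsHead, c1, c2]

lemma pvA_eq_chunk (onsets : List Int) : ascending_patition onsets = pvChunk onsets := by
  cases onsets with
  | nil =>
    simp [ascending_patition, pvChunk,
      PySem.List.pyRange_one_eq_nil (by norm_num : ((([] : List Int).length : Nat) : Int) ≤ 0)]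
  | cons x xs =>
    cases xs with
    | nil => simp [ascending_patition, pvChunk]
    | cons y rest =>
      have hne : ¬ ((x :: y :: rest).length = 1) := by simp
      rw [ascending_patition, if_neg hne]
      have h0 : (0 : Int) < (((x :: y :: rest).length : Nat) : Int) := by simp; omega
      rw [PySem.List.pyRange_one_cons h0]
      simp only [List.foldl_cons]
      have hstep : ascendingStepA (x :: y :: rest) (((x :: y :: rest).length : Nat) : Int)
          ([], []) 0 = ([], [x]) := by
        simp only [ascendingStepA]
        have hn1 : ¬ ((0 : Int) = (((x :: y :: rest).length : Nat) : Int) - 1) := by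
          simp only [List.length_cons]
          push_cast
          omega
        rw [if_pos ⟨Or.inl rfl, hn1⟩]
        simp [PySem.List.pyGetD_zero_cons]
      rw [hstep]
      have hb := pvBridge (y :: rest) [] x [] [x] (by simp)
      simp only [List.length_nil, Nat.cast_zero, List.nil_append, zero_add] at hb
      rw [show (0 : Int) + 1 = 1 from by ring] at *
      rw [hb]
      rw [pvLoopA_chunk (y :: rest) x [] [x] (by simp) (by simp)]
      rcases hc : pvChunk (y :: rest) with _ | ⟨g, gs⟩
      · exact absurd hc (pvChunk_ne_nil y rest)
      · by_cases hy : y = x + 1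
        · have c2 : (y = x + 1) = True := eq_true hy
          simp [pvChunk, hc, pvConsHead, c2]
        · have c2 : (y = x + 1) = False := eq_false hy
          simp [pvChunk, hc, pvConsHead, c2]

-- ===== VERDICT (by name: the statement is the Claim_ definition above) =====
theorem ascending_patition_spec : Claim_equal_ascending_patition := by
  intro onsets _
  unfold Spec_ascending_patition
  rw [pvA_eq_chunk, pvAlt_eq_chunk]
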